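-- pv_equiv track=rewrite | github.com/zhigenzhao/isaac_twist2 | isaac_twist2/g1_twist2_controller.py | _find_joint_index
-- ===== SOURCE A (Python) =====
-- def _find_joint_index(name: str, dof_names: list[str]) -> int | None:
--     """Find a joint by name, with fuzzy fallback."""
--     # Exact match
--     if name in dof_names:
--         return dof_names.index(name)
--     # Fuzzy: strip _joint suffix and try substring
--     stem = name.replace("_joint", "")
--     for i, dn in enumerate(dof_names):
--         if stem in dn or dn in name:
--             return i
--     return None
-- ===== SOURCE B (Python) =====
-- def _find_joint_index(name: str, dof_names: list[str]) -> int | None: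
--     """Find a joint by name, with fuzzy fallback (single pass)."""
--     stem = name.replace("_joint", "")
--     fuzzy = None
--     for i, dn in enumerate(dof_names):
--         if dn == name:
--             return i
--         if fuzzy is None and (stem in dn or dn in name):
--             fuzzy = i
--     return fuzzy
-- ===== Notes on version B (the rewrite author's own statement) =====
-- stated objective: simpler
-- what changed: Replaces the two-phase membership-test + .index scan followed by a separate fuzzy loop with a single pass over enumerate(dof_names) that returns immediately on the first exact match and records the first fuzzy match in an accumulator.
import Mathlib
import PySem

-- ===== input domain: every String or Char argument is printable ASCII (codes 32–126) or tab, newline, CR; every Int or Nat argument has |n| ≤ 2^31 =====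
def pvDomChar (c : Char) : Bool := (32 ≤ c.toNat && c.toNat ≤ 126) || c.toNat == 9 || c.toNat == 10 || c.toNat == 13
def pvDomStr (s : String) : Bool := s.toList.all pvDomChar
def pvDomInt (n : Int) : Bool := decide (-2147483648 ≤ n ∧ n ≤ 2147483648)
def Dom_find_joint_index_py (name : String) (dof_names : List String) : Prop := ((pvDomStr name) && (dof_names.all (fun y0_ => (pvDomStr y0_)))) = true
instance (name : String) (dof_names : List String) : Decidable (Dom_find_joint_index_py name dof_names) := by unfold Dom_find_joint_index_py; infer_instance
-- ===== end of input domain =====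

-- B collapses A's membership-test + .index scan + separate fuzzy loop into one pass
-- that returns on the first exact match and keeps the first fuzzy match in an accumulator (objective: simpler).


-- ===== PORT A =====
-- the fuzzy fallback loop of A: 'for i, dn in enumerate(dof_names): if stem in dn or dn in name: return i'
def pvFuzzyA (stem name : String) : List String → Int → Option Int
  | [], _ => none
  | dn :: rest, i =>
    if PySem.Str.isIn stem dn || PySem.Str.isIn dn name then some i
    else pvFuzzyA stem name rest (i + 1)

def find_joint_index_py (name : String) (dof_names : List String) : Option Int :=
  if name ∈ dof_names then
    (PySem.List.index? dof_names name).map (fun n => (n : Int))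
  else
    let stem := PySem.Str.replace name "_joint" ""
    pvFuzzyA stem name dof_names 0

-- ===== PORT B =====
-- single pass: return immediately on exact match, remember first fuzzy match in 'fuzzy'
def pvLoopB (name stem : String) : List String → Int → Option Int → Option Int
  | [], _, fuzzy => fuzzy
  | dn :: rest, i, fuzzy =>
    if dn == name then some i
    else
      pvLoopB name stem rest (i + 1)
        (if fuzzy.isNone && (PySem.Str.isIn stem dn || PySem.Str.isIn dn name) then some i else fuzzy)

def find_joint_index_py_alt (name : String) (dof_names : List String) : Option Int :=
  let stem := PySem.Str.replace name "_joint" ""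
  pvLoopB name stem dof_names 0 none

-- ===== PRECONDITION & SPEC =====
def Spec_find_joint_index_py (name : String) (dof_names : List String) (out : Option Int) : Prop := out = find_joint_index_py_alt name dof_names
instance (name : String) (dof_names : List String) (out : Option Int) : Decidable (Spec_find_joint_index_py name dof_names out) := by unfold Spec_find_joint_index_py; infer_instance

-- ===== CLAIM (what is proved, stated in full; the proofs are below) =====
def Claim_equal_find_joint_index_py : Prop := ∀ (name : String) (dof_names : List String), Dom_find_joint_index_py name dof_names → Spec_find_joint_index_py name dof_names (find_joint_index_py name dof_names)

-- ===== LEMMAS AND PROOFS =====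

-- B's loop, with pending fuzzy result f, returns the (shifted) first exact-match index if any,
-- else f if pending, else A's fuzzy fallback loop.
theorem pvLoopB_eq (name stem : String) (l : List String) (i : Int) (f : Option Int) :
    pvLoopB name stem l i f =
      if name ∈ l then (List.idxOf? name l).map (fun n => (n : Int) + i)
      else f.elim (pvFuzzyA stem name l i) some := by
  induction l generalizing i f with
  | nil => cases f <;> simp [pvLoopB, pvFuzzyA]
  | cons dn rest ih =>
    by_cases h : dn = name
    · subst h
      simp [pvLoopB, List.idxOf?_cons]
    · have hne : (dn == name) = false := by simp [h]
      have hmem : (name ∈ dn :: rest) ↔ (name ∈ rest) := by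
        rw [List.mem_cons]
        exact or_iff_right (fun hc => h hc.symm)
      simp only [pvLoopB, hne, Bool.false_eq_true, if_false, ih, hmem,
        List.idxOf?_cons, beq_eq_false_iff_ne.mpr h, if_false]
      by_cases hm : name ∈ rest
      · simp only [hm, if_true, Option.map_map]
        cases List.idxOf? name rest with
        | none => simp
        | some k =>
          simp
          ring
      · simp only [hm, if_false]
        cases f with
        | some j => simp
        | none =>
          simp only [Option.isNone_none, Bool.true_and, pvFuzzyA]
          split_ifs with hc
          · simp
          · simp

-- ===== VERDICT (by name: the statement is the Claim_ definition above) =====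
theorem find_joint_index_py_spec : Claim_equal_find_joint_index_py := by
  intro name dof_names _
  unfold Spec_find_joint_index_py find_joint_index_py find_joint_index_py_alt
  rw [pvLoopB_eq]
  by_cases hm : name ∈ dof_names
  · simp [hm, PySem.List.index?_eq_idxOf?]
  · simp [hm]
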